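-- pv_equiv track=rewrite | github.com/kev365/openrelik-worker-kstrike | src/tasks.py | _combine_and_dedupe
-- ===== SOURCE A (Python) =====
-- KSTRIKE_HEADER_PREFIX = "RoleGuid (RoleName)||"
--
-- def _combine_and_dedupe(parsed_outputs: list[str]) -> tuple[str, list[str], int]:
--     """Combine multiple KStrike outputs, keeping one header and deduplicating data rows.
--
--     Returns:
--         Tuple of (header line or None, list of unique data rows, total unique row count).
--     """
--     header = None
--     seen = set()
--     unique_rows = []
--
--     for output in parsed_outputs:
--         for line in output.splitlines():
--             stripped = line.strip()
--             if not stripped: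
--                 continue
--             if stripped.startswith(KSTRIKE_HEADER_PREFIX):
--                 if header is None:
--                     header = stripped
--                 continue
--             if stripped not in seen:
--                 seen.add(stripped)
--                 unique_rows.append(stripped)
--
--     return header, unique_rows, len(unique_rows)
-- ===== SOURCE B (Python) =====
-- KSTRIKE_HEADER_PREFIX = "RoleGuid (RoleName)||"
--
--
-- def _dedupe(rows):
--     # filter-out dedupe: emit the head, delete every later copy of it, repeat
--     unique = []
--     while rows:
--         head = rows[0]
--         unique.append(head)
--         rows = [r for r in rows[1:] if r != head]
--     return unique
--
--
-- def _combine_and_dedupe(parsed_outputs):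
--     flat = [s for out in parsed_outputs
--             for s in (line.strip() for line in out.splitlines()) if s]
--     header = next((l for l in flat if l.startswith(KSTRIKE_HEADER_PREFIX)), None)
--     unique_rows = _dedupe([l for l in flat if not l.startswith(KSTRIKE_HEADER_PREFIX)])
--     return header, unique_rows, len(unique_rows)
-- ===== Notes on version B (the rewrite author's own statement) =====
-- stated objective: alternative
-- what changed: A does one fused interleaved scan carrying header/seen-hash-set/rows state; B restructures into staged passes (flatten stripped non-empty lines, first-match header scan) and dedupes with no hash structure at all, by repeated filter-out: emit the head row, delete all its later copies, repeat on the shrunken list.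
import Mathlib
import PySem

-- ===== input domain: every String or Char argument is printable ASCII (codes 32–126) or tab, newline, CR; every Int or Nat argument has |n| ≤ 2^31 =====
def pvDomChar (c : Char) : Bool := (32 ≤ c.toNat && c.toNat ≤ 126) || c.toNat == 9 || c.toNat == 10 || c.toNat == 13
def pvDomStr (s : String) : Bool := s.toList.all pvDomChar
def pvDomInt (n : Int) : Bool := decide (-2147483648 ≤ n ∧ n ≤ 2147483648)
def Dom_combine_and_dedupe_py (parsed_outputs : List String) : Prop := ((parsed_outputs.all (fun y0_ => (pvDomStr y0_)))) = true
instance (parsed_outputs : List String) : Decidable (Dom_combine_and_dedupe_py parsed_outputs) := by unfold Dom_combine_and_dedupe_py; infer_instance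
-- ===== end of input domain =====

-- B replaces A's fused scan with a hash seen-set by staged passes (flatten, first-match
-- header scan) and a comparison-based filter-out dedupe with no hash structure; objective: alternative.

def pvKstrikeHeaderPrefix : String := "RoleGuid (RoleName)||"

-- ===== PORT A =====
-- A's inner loop body: state = (header, seen set, unique_rows)
def pvStepA (st : Option String × PySem.Set String × List String) (line : String) :
    Option String × PySem.Set String × List String :=
  let stripped := PySem.Str.strip line
  if stripped = "" then st
  else if PySem.Str.startswith stripped pvKstrikeHeaderPrefix then
    (if st.1.isNone then some stripped else st.1, st.2.1, st.2.2)
  else if PySem.Set.contains st.2.1 stripped then st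
  else (st.1, PySem.Set.add st.2.1 stripped, st.2.2 ++ [stripped])

def combine_and_dedupe_py (parsed_outputs : List String) : Option String × List String × Int :=
  let st :=
    parsed_outputs.foldl
      (fun st output => (PySem.Str.splitlines output).foldl pvStepA st)
      (none, PySem.Set.empty, ([] : List String))
  (st.1, st.2.2, (st.2.2.length : Int))

-- ===== PORT B =====
-- B's _dedupe while-loop: emit the head, delete all its later copies, repeat
def pvDedupe (rows : List String) : List String :=
  match rows with
  | [] => []
  | head :: rest => head :: pvDedupe (rest.filter (fun r => r != head))
  termination_by rows.length
  decreasing_by simpa using Nat.lt_succ_of_le (List.length_filter_le _ _)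

-- staged passes: flatten stripped non-empty lines, first-match header scan, filter-out dedupe
def combine_and_dedupe_py_alt (parsed_outputs : List String) : Option String × List String × Int :=
  let flat := parsed_outputs.flatMap
    (fun output => ((PySem.Str.splitlines output).map PySem.Str.strip).filter (fun s => s != ""))
  let header := flat.find? (fun l => PySem.Str.startswith l pvKstrikeHeaderPrefix)
  let unique_rows :=
    pvDedupe (flat.filter (fun l => !(PySem.Str.startswith l pvKstrikeHeaderPrefix)))
  (header, unique_rows, (unique_rows.length : Int))

-- ===== PRECONDITION & SPEC =====
def Spec_combine_and_dedupe_py (parsed_outputs : List String) (out : Option String × List String × Int) : Prop := out = combine_and_dedupe_py_alt parsed_outputs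
instance (parsed_outputs : List String) (out : Option String × List String × Int) : Decidable (Spec_combine_and_dedupe_py parsed_outputs out) := by unfold Spec_combine_and_dedupe_py; infer_instance

-- ===== CLAIM (what is proved, stated in full; the proofs are below) =====
def Claim_equal_combine_and_dedupe_py : Prop := ∀ (parsed_outputs : List String), Dom_combine_and_dedupe_py parsed_outputs → Spec_combine_and_dedupe_py parsed_outputs (combine_and_dedupe_py parsed_outputs)

-- ===== LEMMAS AND PROOFS =====

-- folding Set.add from acc emits, after acc, exactly the filter-out dedupe of the fresh elements
theorem pvFoldAdd_eq (zs : List String) (acc : List String) :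
    zs.foldl PySem.Set.add acc = acc ++ pvDedupe (zs.filter (fun r => !(acc.contains r))) := by
  induction zs generalizing acc with
  | nil => simp [pvDedupe]
  | cons y zs ih =>
    rw [List.foldl_cons, ih]
    by_cases hy : y ∈ acc
    · rw [PySem.Set.add_of_mem hy, List.filter_cons_of_neg (by simp [hy])]
    · rw [PySem.Set.add_of_not_mem hy, List.filter_cons_of_pos (by simp [hy]), pvDedupe,
        List.append_assoc, List.singleton_append, List.filter_filter]
      congr 3
      apply List.filter_congr
      intro r _
      by_cases hr : r = y <;> simp [hr, hy]

theorem pvDedupe_eq_dedup (xs : List String) : pvDedupe xs = PySem.List.dedup xs := by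
  have h := pvFoldAdd_eq xs []
  simp only [List.contains_nil, Bool.not_false, List.filter_true, List.nil_append] at h
  rw [PySem.List.dedup_eq_ofList, PySem.Set.ofList_eq_foldl, h]

-- A's loop body on the collapsed state (header, rows): the seen set always equals unique_rows
def pvStep (st : Option String × List String) (line : String) : Option String × List String :=
  let stripped := PySem.Str.strip line
  if stripped = "" then st
  else if PySem.Str.startswith stripped pvKstrikeHeaderPrefix then
    (if st.1.isNone then some stripped else st.1, st.2)
  else if PySem.Set.contains st.2 stripped then st
  else (st.1, st.2 ++ [stripped])

theorem pvFoldA_eq (lines : List String) (h : Option String) (rows : List String) :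
    lines.foldl pvStepA (h, rows, rows) =
      ((lines.foldl pvStep (h, rows)).1,
       (lines.foldl pvStep (h, rows)).2,
       (lines.foldl pvStep (h, rows)).2) := by
  induction lines generalizing h rows with
  | nil => simp
  | cons line rest ih =>
    simp only [List.foldl_cons, pvStepA, pvStep, PySem.Set.add]
    split_ifs <;> simp [ih]

def pvFlatOf (lines : List String) : List String :=
  (lines.map PySem.Str.strip).filter (fun s => s != "")

theorem pvFlatOf_cons (line : String) (rest : List String) :
    pvFlatOf (line :: rest) =
      if PySem.Str.strip line = "" then pvFlatOf rest
      else PySem.Str.strip line :: pvFlatOf rest := by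
  by_cases h : PySem.Str.strip line = "" <;>
    simp [pvFlatOf, h]

theorem pvFold_eq (lines : List String) (h : Option String) (rows : List String) :
    lines.foldl pvStep (h, rows) =
      ((if h.isNone then (pvFlatOf lines).find? (fun l => PySem.Str.startswith l pvKstrikeHeaderPrefix) else h),
       PySem.Set.update rows ((pvFlatOf lines).filter (fun l => !(PySem.Str.startswith l pvKstrikeHeaderPrefix)))) := by
  induction lines generalizing h rows with
  | nil => cases h <;> simp [pvFlatOf, PySem.Set.update]
  | cons line rest ih =>
    rw [List.foldl_cons, pvFlatOf_cons]
    by_cases he : PySem.Str.strip line = ""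
    · rw [if_pos he,
        show pvStep (h, rows) line = (h, rows) from by simp only [pvStep, if_pos he]]
      exact ih h rows
    · rw [if_neg he]
      by_cases hp : PySem.Str.startswith (PySem.Str.strip line) pvKstrikeHeaderPrefix = true
      · rw [show pvStep (h, rows) line =
              ((if h.isNone then some (PySem.Str.strip line) else h), rows) from by
            simp only [pvStep, if_neg he, if_pos hp],
          ih,
          List.find?_cons_of_pos (p := fun l => PySem.Str.startswith l pvKstrikeHeaderPrefix) hp,
          List.filter_cons_of_neg (p := fun l => !(PySem.Str.startswith l pvKstrikeHeaderPrefix))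
            (by simp only [hp]; decide)]
        cases h <;> simp
      · have hpf : PySem.Str.startswith (PySem.Str.strip line) pvKstrikeHeaderPrefix = false :=
          Bool.eq_false_iff.mpr hp
        rw [show pvStep (h, rows) line = (h, PySem.Set.add rows (PySem.Str.strip line)) from by
            simp only [pvStep, if_neg he, if_neg hp, PySem.Set.add]
            split <;> rfl,
          ih,
          List.find?_cons_of_neg (p := fun l => PySem.Str.startswith l pvKstrikeHeaderPrefix) hp,
          List.filter_cons_of_pos (p := fun l => !(PySem.Str.startswith l pvKstrikeHeaderPrefix))
            (by simp only [hpf, Bool.not_false])]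
        rfl

-- ===== VERDICT (by name: the statement is the Claim_ definition above) =====
theorem combine_and_dedupe_py_spec : Claim_equal_combine_and_dedupe_py := by
  intro parsed_outputs _
  show combine_and_dedupe_py parsed_outputs = combine_and_dedupe_py_alt parsed_outputs
  have key : parsed_outputs.foldl
      (fun st output => (PySem.Str.splitlines output).foldl pvStepA st)
      ((none : Option String), PySem.Set.empty, ([] : List String)) =
      (((pvFlatOf (parsed_outputs.flatMap PySem.Str.splitlines)).find?
          (fun l => PySem.Str.startswith l pvKstrikeHeaderPrefix)),
       (PySem.List.dedup ((pvFlatOf (parsed_outputs.flatMap PySem.Str.splitlines)).filter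
          (fun l => !(PySem.Str.startswith l pvKstrikeHeaderPrefix)))),
       (PySem.List.dedup ((pvFlatOf (parsed_outputs.flatMap PySem.Str.splitlines)).filter
          (fun l => !(PySem.Str.startswith l pvKstrikeHeaderPrefix))))) := by
    rw [show ((none : Option String), PySem.Set.empty, ([] : List String)) =
          ((none : Option String), ([] : List String), ([] : List String)) from rfl,
      ← List.foldl_flatMap, pvFoldA_eq, pvFold_eq]
    simp [PySem.Set.update_nil_left]
  have hflat : pvFlatOf (parsed_outputs.flatMap PySem.Str.splitlines) =
      parsed_outputs.flatMap
        (fun output => ((PySem.Str.splitlines output).map PySem.Str.strip).filter (fun s => s != "")) := by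
    simp [pvFlatOf, List.map_flatMap, List.filter_flatMap]
  unfold combine_and_dedupe_py combine_and_dedupe_py_alt
  rw [key, hflat]
  simp only [pvDedupe_eq_dedup]
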